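-- pv_equiv track=rewrite | github.com/MarcCG0/prosper-challenge | prosper/ehr/adapters/graphql.py | _looks_like_auth_error
-- ===== SOURCE A (Python) =====
-- def _looks_like_auth_error(message: str) -> bool:
--     msg = message.lower()
--     return any(
--         key in msg
--         for key in (
--             "unauthorized",
--             "not authorized",
--             "forbidden",
--             "expired",
--             "invalid token",
--             "jwt",
--             "authentication",
--         )
--     )
-- ===== SOURCE B (Python) =====
-- _AUTH_KEYWORDS = (
--     "unauthorized",
--     "not authorized",
--     "forbidden",
--     "expired",
--     "invalid token",
--     "jwt",
--     "authentication",
-- )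
--
--
-- def _looks_like_auth_error(message: str) -> bool:
--     # Single left-to-right scan: at each position check whether any
--     # keyword starts there, instead of one substring search per keyword.
--     msg = message.lower()
--     for i in range(len(msg)):
--         for key in _AUTH_KEYWORDS:
--             if msg.startswith(key, i):
--                 return True
--     return False
-- ===== Notes on version B (the rewrite author's own statement) =====
-- stated objective: alternative
-- what changed: Replaces the per-keyword substring searches with a single left-to-right scan over the lowered message that checks at each position whether any keyword starts there.
import Mathlib
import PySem

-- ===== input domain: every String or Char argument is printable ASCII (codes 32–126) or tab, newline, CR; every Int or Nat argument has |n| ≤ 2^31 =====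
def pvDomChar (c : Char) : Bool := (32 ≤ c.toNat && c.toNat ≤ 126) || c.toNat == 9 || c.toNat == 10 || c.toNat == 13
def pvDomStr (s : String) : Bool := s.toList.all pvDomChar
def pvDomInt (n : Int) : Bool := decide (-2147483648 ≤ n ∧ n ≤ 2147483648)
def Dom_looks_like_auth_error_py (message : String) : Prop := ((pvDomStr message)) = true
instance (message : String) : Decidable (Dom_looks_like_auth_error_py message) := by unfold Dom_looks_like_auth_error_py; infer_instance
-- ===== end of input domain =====

-- B replaces A's per-keyword substring searches with one left-to-right scan
-- over the lowered message checking at each position whether any keyword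
-- starts there (objective: alternative, same cost).

-- ===== PORT A =====
def pvKeywords : List (List Char) :=
  ["unauthorized".toList, "not authorized".toList, "forbidden".toList,
   "expired".toList, "invalid token".toList, "jwt".toList, "authentication".toList]

def looks_like_auth_error_py (message : String) : Bool :=
  let msg := PySem.Chars.lower message.toList
  pvKeywords.any (fun key => PySem.Chars.isIn key msg)

-- ===== PORT B =====
-- the position loop 'for i in range(len(msg))' transcribed as recursion over
-- the suffix msg[i:]; 'msg.startswith(key, i)' is startswith on that suffix
def pvScan (suffix : List Char) : Bool :=
  match suffix with
  | [] => false
  | c :: rest =>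
    if pvKeywords.any (fun key => PySem.Chars.startswith (c :: rest) key) then true
    else pvScan rest

def looks_like_auth_error_py_alt (message : String) : Bool :=
  pvScan (PySem.Chars.lower message.toList)

-- ===== PRECONDITION & SPEC =====
def Spec_looks_like_auth_error_py (message : String) (out : Bool) : Prop := out = looks_like_auth_error_py_alt message
instance (message : String) (out : Bool) : Decidable (Spec_looks_like_auth_error_py message out) := by unfold Spec_looks_like_auth_error_py; infer_instance

-- ===== CLAIM (what is proved, stated in full; the proofs are below) =====
def Claim_equal_looks_like_auth_error_py : Prop := ∀ (message : String), Dom_looks_like_auth_error_py message → Spec_looks_like_auth_error_py message (looks_like_auth_error_py message)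

-- ===== LEMMAS AND PROOFS =====
lemma pvScan_iff (l : List Char) :
    pvScan l = true ↔ ∃ k ∈ pvKeywords, k <:+: l := by
  induction l with
  | nil =>
    simp only [pvScan]
    constructor
    · intro h; cases h
    rintro ⟨k, hk, hinf⟩
    exfalso
    have : k = [] := List.eq_nil_of_infix_nil hinf
    subst this
    revert hk; decide
  | cons c rest ih =>
    simp only [pvScan]
    split_ifs with h
    · simp only [true_iff]
      rcases List.any_eq_true.mp h with ⟨k, hk, hp⟩
      exact ⟨k, hk, (PySem.Chars.startswith_iff _ _).mp hp |>.isInfix⟩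
    · rw [ih]
      constructor
      · rintro ⟨k, hk, hinf⟩; exact ⟨k, hk, List.infix_cons_iff.mpr (Or.inr hinf)⟩
      · rintro ⟨k, hk, hinf⟩
        rcases (List.infix_cons_iff).mp hinf with hpre | hinf'
        · exact absurd (List.any_eq_true.mpr ⟨k, hk, (PySem.Chars.startswith_iff _ _).mpr hpre⟩) h
        · exact ⟨k, hk, hinf'⟩

-- ===== VERDICT (by name: the statement is the Claim_ definition above) =====
theorem looks_like_auth_error_py_spec : Claim_equal_looks_like_auth_error_py := by
  intro message _
  unfold Spec_looks_like_auth_error_py looks_like_auth_error_py looks_like_auth_error_py_alt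
  set msg := PySem.Chars.lower message.toList
  rcases h : pvScan msg with hf | ht
  · simp only [List.any_eq_false]
    intro k hk
    rw [show (¬PySem.Chars.isIn k msg = true) ↔ PySem.Chars.isIn k msg = false by simp,
       PySem.Chars.isIn_eq_false_iff]
    intro hinf
    exact absurd ((pvScan_iff msg).mpr ⟨k, hk, hinf⟩) (by simp [h])
  · simp only [List.any_eq_true]
    rcases (pvScan_iff msg).mp h with ⟨k, hk, hinf⟩
    exact ⟨k, hk, (PySem.Chars.isIn_iff_infix _ _).mpr hinf⟩
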